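-- pv_equiv track=rewrite | github.com/kurtulus-bartu/PERSONAL_ASSISTANT_BACKEND | app/main.py | _metadata_value
-- ===== SOURCE A (Python) =====
-- from typing import List, Optional, Dict, Any, Set
--
-- def _metadata_value(metadata: Dict[str, Any], keys: List[str]) -> Optional[str]:
--     if not metadata:
--         return None
--
--     lowered_map = {str(k).lower(): k for k in metadata.keys()}
--     for key in keys:
--         raw_key = lowered_map.get(str(key).lower(), key)
--         value = metadata.get(raw_key)
--         if value is None:
--             continue
--         value_str = str(value).strip()
--         if value_str:
--             return value_str
--     return None
-- ===== SOURCE B (Python) =====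
-- from typing import List, Optional, Dict, Any
--
-- def _metadata_value(metadata: Dict[str, Any], keys: List[str]) -> Optional[str]:
--     for key in keys:
--         target = str(key).lower()
--         found = None
--         for k, v in metadata.items():
--             if str(k).lower() == target:
--                 found = v  # last case-variant wins, like A's lowered_map
--         if found is None:
--             continue
--         text = str(found).strip()
--         if text:
--             return text
--     return None
-- ===== Notes on version B (the rewrite author's own statement) =====
-- stated objective: simpler
-- what changed: Dropped the prebuilt lowercase-key map and the emptiness guard; per candidate key B scans the metadata items directly, keeping the value of the last key whose lowercase form matches, instead of building a lowered->original key dict and doing two dict lookups.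
import Mathlib
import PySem

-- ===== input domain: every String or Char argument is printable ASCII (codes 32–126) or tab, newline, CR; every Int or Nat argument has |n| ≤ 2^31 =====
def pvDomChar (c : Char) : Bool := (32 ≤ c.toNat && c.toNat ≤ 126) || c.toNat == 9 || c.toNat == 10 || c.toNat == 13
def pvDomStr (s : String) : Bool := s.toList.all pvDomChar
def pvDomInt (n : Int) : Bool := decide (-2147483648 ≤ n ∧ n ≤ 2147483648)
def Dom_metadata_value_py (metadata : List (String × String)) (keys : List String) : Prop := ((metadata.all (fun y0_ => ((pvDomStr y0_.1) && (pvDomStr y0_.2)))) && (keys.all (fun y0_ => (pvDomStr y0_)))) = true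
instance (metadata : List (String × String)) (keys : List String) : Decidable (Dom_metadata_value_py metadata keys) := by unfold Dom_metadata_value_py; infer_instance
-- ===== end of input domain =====

-- B drops A's prebuilt lowercase-key map (and the emptiness guard) and instead scans the
-- metadata items directly per candidate key, keeping the last case-insensitive match (simpler).

-- ===== PORT A =====
-- the 'for key in keys' loop of A
def pvGoA (d lowered : PySem.Dict String String) : List String → Option String
  | [] => none
  | key :: rest =>
    let raw_key := lowered.getD (PySem.Str.lower key) key
    match d.get? raw_key with
    | none => pvGoA d lowered rest
    | some value =>
      let value_str := PySem.Str.strip value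
      if value_str = "" then pvGoA d lowered rest else some value_str

def metadata_value_py (metadata : List (String × String)) (keys : List String) : Option String :=
  let d : PySem.Dict String String := PySem.Dict.ofList metadata
  if d.items = [] then none
  else
    let lowered_map := PySem.Dict.ofList (d.keys.map (fun k => (PySem.Str.lower k, k)))
    pvGoA d lowered_map keys

-- ===== PORT B =====
-- the 'for key in keys' loop of B; the inner foldl is B's break-less scan over metadata.items()
def pvGoB (items : List (String × String)) : List String → Option String
  | [] => none
  | key :: rest =>
    let target := PySem.Str.lower key
    let found := items.foldl (fun acc kv => if PySem.Str.lower kv.1 = target then some kv.2 else acc) none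
    match found with
    | none => pvGoB items rest
    | some v =>
      let text := PySem.Str.strip v
      if text = "" then pvGoB items rest else some text

def metadata_value_py_alt (metadata : List (String × String)) (keys : List String) : Option String :=
  pvGoB (PySem.Dict.ofList metadata : PySem.Dict String String).items keys

-- ===== PRECONDITION & SPEC =====
def Spec_metadata_value_py (metadata : List (String × String)) (keys : List String) (out : Option String) : Prop := out = metadata_value_py_alt metadata keys
instance (metadata : List (String × String)) (keys : List String) (out : Option String) : Decidable (Spec_metadata_value_py metadata keys out) := by unfold Spec_metadata_value_py; infer_instance

-- ===== CLAIM (what is proved, stated in full; the proofs are below) =====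
def Claim_equal_metadata_value_py : Prop := ∀ (metadata : List (String × String)) (keys : List String), Dom_metadata_value_py metadata keys → Spec_metadata_value_py metadata keys (metadata_value_py metadata keys)

-- ===== LEMMAS AND PROOFS =====

-- 'last match wins' fold, the common shape of B's inner loop and of A's dict comprehension
def pvLast {α β : Type} (c : α → Prop) [DecidablePred c] (f : α → β) (L : List α) : Option β :=
  L.foldl (fun acc x => if c x then some (f x) else acc) none

theorem pvLast_append {α β : Type} (c : α → Prop) [DecidablePred c] (f : α → β)
    (L : List α) (p : α) :
    pvLast c f (L ++ [p]) = if c p then some (f p) else pvLast c f L := by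
  simp [pvLast, List.foldl_append]

theorem pvLast_map {α β γ : Type} (c : α → Prop) [DecidablePred c] (f : α → β)
    (g : γ → α) (L : List γ) :
    pvLast c f (L.map g) = pvLast (fun x => c (g x)) (fun x => f (g x)) L := by
  simp [pvLast, List.foldl_map]

theorem pvLast_eq_map_id {α β : Type} (c : α → Prop) [DecidablePred c] (f : α → β)
    (L : List α) :
    pvLast c f L = (pvLast c (fun x => x) L).map f := by
  induction L using List.reverseRecOn with
  | nil => rfl
  | append_singleton L p ih =>
    rw [pvLast_append, pvLast_append]
    split_ifs with h
    · rfl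
    · exact ih

theorem pvLast_none_iff {α β : Type} (c : α → Prop) [DecidablePred c] (f : α → β)
    (L : List α) :
    pvLast c f L = none ↔ ∀ x ∈ L, ¬ c x := by
  induction L using List.reverseRecOn with
  | nil => simp [pvLast]
  | append_singleton L p ih =>
    rw [pvLast_append]
    split_ifs with hc
    · constructor
      · intro h; cases h
      · intro h; exact absurd hc (h p (by simp))
    · rw [ih]
      constructor
      · intro h x hx
        rcases List.mem_append.mp hx with h1 | h1
        · exact h x h1
        · simp only [List.mem_singleton] at h1; subst h1; exact hc
      · intro h x hx; exact h x (List.mem_append_left _ hx)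

theorem pvLast_id_some_mem {α : Type} (c : α → Prop) [DecidablePred c]
    (L : List α) (x : α) (h : pvLast c (fun y => y) L = some x) : x ∈ L ∧ c x := by
  induction L using List.reverseRecOn with
  | nil => simp [pvLast] at h
  | append_singleton L p ih =>
    rw [pvLast_append] at h
    split_ifs at h with hc
    · cases h; exact ⟨List.mem_append_right _ (by simp), hc⟩
    · rcases ih h with ⟨hm, hcx⟩
      exact ⟨List.mem_append_left _ hm, hcx⟩

theorem pv_get?_foldl_insert (P : List (String × String)) (d : PySem.Dict String String)
    (x : String) :
    (P.foldl (fun d p => d.insert p.1 p.2) d).get? x =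
      match pvLast (fun p => p.1 = x) (fun p => p.2) P with
      | some v => some v
      | none => d.get? x := by
  induction P using List.reverseRecOn with
  | nil => rfl
  | append_singleton P p ih =>
    rw [List.foldl_append, pvLast_append]
    simp only [List.foldl_cons, List.foldl_nil]
    rw [PySem.Dict.get?_insert]
    split_ifs with h1 h2 h2
    · subst h2; rfl
    · exact absurd h1.symm h2
    · exact absurd h2.symm h1
    · exact ih

theorem pv_get?_ofList (P : List (String × String)) (x : String) :
    (PySem.Dict.ofList P : PySem.Dict String String).get? x =
      pvLast (fun p => p.1 = x) (fun p => p.2) P := by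
  have h : (PySem.Dict.ofList P : PySem.Dict String String) =
      P.foldl (fun d p => d.insert p.1 p.2) PySem.Dict.empty := rfl
  rw [h, pv_get?_foldl_insert]
  cases pvLast (fun p => p.1 = x) (fun p => p.2) P <;> simp [PySem.Dict.get?_empty]

-- A's two-dict lookup for one candidate key equals B's single last-match scan over the items
theorem pv_lookup_eq (d : PySem.Dict String String) (hnd : d.keys.Nodup) (key : String) :
    d.get? ((PySem.Dict.ofList (d.keys.map (fun k => (PySem.Str.lower k, k))) :
        PySem.Dict String String).getD (PySem.Str.lower key) key) =
      pvLast (fun kv : String × String => PySem.Str.lower kv.1 = PySem.Str.lower key)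
        (fun kv => kv.2) d.items := by
  have hkeys : d.keys = d.items.map (fun p => p.1) := rfl
  have h1 : (PySem.Dict.ofList (d.keys.map (fun k => (PySem.Str.lower k, k))) :
      PySem.Dict String String).get? (PySem.Str.lower key) =
      pvLast (fun k : String => PySem.Str.lower k = PySem.Str.lower key) (fun k => k) d.keys := by
    rw [pv_get?_ofList, pvLast_map]
  have hlk : pvLast (fun k : String => PySem.Str.lower k = PySem.Str.lower key)
      (fun k => k) d.keys =
      (pvLast (fun kv : String × String => PySem.Str.lower kv.1 = PySem.Str.lower key)
        (fun kv => kv) d.items).map (fun p => p.1) := by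
    rw [hkeys, pvLast_map, pvLast_eq_map_id]
  rw [PySem.Dict.getD_eq_get?_getD, h1, hlk,
    pvLast_eq_map_id (fun kv : String × String => PySem.Str.lower kv.1 = PySem.Str.lower key)
      (fun kv => kv.2)]
  cases h : pvLast (fun kv : String × String => PySem.Str.lower kv.1 = PySem.Str.lower key)
      (fun kv => kv) d.items with
  | none =>
    simp only [Option.map_none, Option.getD_none]
    rw [PySem.Dict.get?_eq_none_iff_not_mem_keys]
    intro hmem
    rw [hkeys] at hmem
    rcases List.mem_map.mp hmem with ⟨p, hp, hpk⟩
    have hnone := (pvLast_none_iff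
      (fun kv : String × String => PySem.Str.lower kv.1 = PySem.Str.lower key)
      (fun kv => kv) d.items).mp h p hp
    rw [hpk] at hnone
    exact hnone rfl
  | some p =>
    simp only [Option.map_some, Option.getD_some]
    rcases pvLast_id_some_mem _ d.items p h with ⟨hm, _⟩
    obtain ⟨k, v⟩ := p
    exact PySem.Dict.get?_of_mem_items d hm hnd

theorem pvGoB_nil (keys : List String) : pvGoB [] keys = none := by
  induction keys with
  | nil => rfl
  | cons key rest ih => simpa [pvGoB] using ih

theorem pvGo_eq (d : PySem.Dict String String) (hnd : d.keys.Nodup) (keys : List String) :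
    pvGoA d (PySem.Dict.ofList (d.keys.map (fun k => (PySem.Str.lower k, k)))) keys =
      pvGoB d.items keys := by
  induction keys with
  | nil => rfl
  | cons key rest ih =>
    have hl := pv_lookup_eq d hnd key
    simp only [pvGoA, pvGoB]
    rw [hl]
    have hfold : d.items.foldl
        (fun acc kv => if PySem.Str.lower kv.1 = PySem.Str.lower key then some kv.2 else acc)
        none =
        pvLast (fun kv : String × String => PySem.Str.lower kv.1 = PySem.Str.lower key)
          (fun kv => kv.2) d.items := rfl
    rw [hfold]
    cases pvLast (fun kv : String × String => PySem.Str.lower kv.1 = PySem.Str.lower key)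
        (fun kv => kv.2) d.items with
    | none => exact ih
    | some v =>
      simp only []
      split_ifs <;> [exact ih; rfl]

-- ===== VERDICT (by name: the statement is the Claim_ definition above) =====
theorem metadata_value_py_spec : Claim_equal_metadata_value_py := by
  intro metadata keys _
  unfold Spec_metadata_value_py metadata_value_py metadata_value_py_alt
  have hnd : (PySem.Dict.ofList metadata : PySem.Dict String String).keys.Nodup :=
    PySem.Dict.nodup_keys_ofList metadata
  by_cases h : (PySem.Dict.ofList metadata : PySem.Dict String String).items = []
  · rw [if_pos h, h, pvGoB_nil]
  · rw [if_neg h]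
    exact pvGo_eq (PySem.Dict.ofList metadata) hnd keys
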